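-- pv_equiv track=rewrite | github.com/sadadonline17-oss/yousef-shtiwe-worm-v2 | knowledge_base/curation/file_cache.py | _scan_yaml_complexity
-- ===== SOURCE A (Python) =====
-- def _scan_yaml_complexity(content: str) -> tuple[int, int, int, int]:
--     """
--     Cheap single-pass scan for ``(max_indent, max_flow_depth, anchors, aliases)``.
--
--     Approximate by design — we want to reject obviously hostile inputs
--     before yaml.safe_load touches them, not replicate the parser. False
--     negatives (something pathological we miss) are handled by
--     yaml.safe_load's own defences; false positives (a legit file
--     rejected) require raising the constants above.
--
--     The scan is line-based but ignores comments (``# …``) and naive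
--     about single/double quoted strings: a ``{`` inside a quoted string
--     still counts toward nesting depth. This is intentional — the
--     overcount is bounded and always safe.
--     """
--     max_indent = 0
--     flow_depth = 0
--     max_flow_depth = 0
--     anchors = 0
--     aliases = 0
--     for line in content.splitlines():
--         # Indentation depth via leading spaces on non-blank lines.
--         lstripped = line.lstrip(" ")
--         if lstripped and not lstripped.startswith("#"):
--             indent = len(line) - len(lstripped)
--             if indent > max_indent:
--                 max_indent = indent
--         # Flow-style nesting and anchor/alias counts.
--         for ch in line:
--             if ch in "{[":
--                 flow_depth += 1
--                 if flow_depth > max_flow_depth: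
--                     max_flow_depth = flow_depth
--             elif ch in "}]":
--                 if flow_depth > 0:
--                     flow_depth -= 1
--             elif ch == "&":
--                 anchors += 1
--             elif ch == "*":
--                 aliases += 1
--     return max_indent, max_flow_depth, anchors, aliases
-- ===== SOURCE B (Python) =====
-- def _scan_yaml_complexity(content: str) -> tuple[int, int, int, int]:
--     """Staged scan: per-metric passes instead of one fused loop."""
--     anchors = content.count("&")
--     aliases = content.count("*")
--
--     indents = (
--         len(line) - len(stripped)
--         for line in content.splitlines()
--         for stripped in (line.lstrip(" "),)
--         if stripped and not stripped.startswith("#")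
--     )
--     max_indent = max(indents, default=0)
--
--     depth = 0
--     max_flow_depth = 0
--     for ch in content:
--         if ch in "{[":
--             depth += 1
--             max_flow_depth = max(max_flow_depth, depth)
--         elif ch in "}]" and depth > 0:
--             depth -= 1
--
--     return max_indent, max_flow_depth, anchors, aliases
-- ===== Notes on version B (the rewrite author's own statement) =====
-- stated objective: alternative
-- what changed: Replaces A's single fused per-line/per-char loop carrying five state variables with four independent staged passes: anchors/aliases via content.count, max_indent as a max over a generator of per-line indents, and max_flow_depth in its own running-balance pass over the whole content string (newline characters are bracket-neutral, so a content-wide pass equals A's per-line pass).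
import Mathlib
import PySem

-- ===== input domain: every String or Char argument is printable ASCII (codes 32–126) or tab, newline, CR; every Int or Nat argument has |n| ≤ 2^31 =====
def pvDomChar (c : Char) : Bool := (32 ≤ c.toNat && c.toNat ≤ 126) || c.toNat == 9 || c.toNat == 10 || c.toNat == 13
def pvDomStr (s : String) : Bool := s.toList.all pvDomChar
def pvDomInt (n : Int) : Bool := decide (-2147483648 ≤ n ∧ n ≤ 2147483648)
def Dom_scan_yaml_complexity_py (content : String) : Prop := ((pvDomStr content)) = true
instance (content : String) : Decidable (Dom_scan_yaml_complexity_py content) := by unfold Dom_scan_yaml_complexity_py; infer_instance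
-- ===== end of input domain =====

-- B splits A's single fused per-line/per-char loop into four staged passes (counts, a max of
-- per-line indents, and one content-wide flow-depth balance pass); same values, same O(n) cost.

-- ===== PORT A =====
-- per-char body of A's inner loop, on the state (max_indent, flow_depth, max_flow_depth, anchors, aliases)
def pyAChar (st : Int × Int × Int × Int × Int) (ch : Char) : Int × Int × Int × Int × Int :=
  if ch = '{' ∨ ch = '[' then
    let fd := st.2.1 + 1
    let mfd := if fd > st.2.2.1 then fd else st.2.2.1
    (st.1, fd, mfd, st.2.2.2)
  else if ch = '}' ∨ ch = ']' then
    (if st.2.1 > 0 then (st.1, st.2.1 - 1, st.2.2) else st)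
  else if ch = '&' then (st.1, st.2.1, st.2.2.1, st.2.2.2.1 + 1, st.2.2.2.2)
  else if ch = '*' then (st.1, st.2.1, st.2.2.1, st.2.2.2.1, st.2.2.2.2 + 1)
  else st

-- body of A's outer 'for line in content.splitlines()' loop
def pyALine (st : Int × Int × Int × Int × Int) (line : String) : Int × Int × Int × Int × Int :=
  -- line.lstrip(" ") removes leading spaces only: dropWhile (· == ' ') is exact
  let lstripped := line.toList.dropWhile (fun c => c == ' ')
  let st1 := if lstripped ≠ [] ∧ PySem.Chars.startswith lstripped ['#'] = false then
      let indent : Int := PySem.Str.len line - (lstripped.length : Int)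
      if indent > st.1 then (indent, st.2) else st
    else st
  line.toList.foldl pyAChar st1

def scan_yaml_complexity_py (content : String) : Int × Int × Int × Int :=
  let r := (PySem.Str.splitlines content).foldl pyALine (0, 0, 0, 0, 0)
  (r.1, r.2.2.1, r.2.2.2.1, r.2.2.2.2)

-- ===== PORT B =====
-- the per-line indent generator element: some indent if the line survives the guard, else none
def pyBIndent (line : String) : Option Int :=
  -- line.lstrip(" ") removes leading spaces only: dropWhile (· == ' ') is exact
  let stripped := line.toList.dropWhile (fun c => c == ' ')
  if stripped ≠ [] ∧ PySem.Chars.startswith stripped ['#'] = false then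
    some (PySem.Str.len line - (stripped.length : Int))
  else none

-- body of B's flow-depth pass, on the state (depth, max_flow_depth)
def pyBFlow (p : Int × Int) (ch : Char) : Int × Int :=
  if ch = '{' ∨ ch = '[' then (p.1 + 1, max p.2 (p.1 + 1))
  else if (ch = '}' ∨ ch = ']') ∧ p.1 > 0 then (p.1 - 1, p.2)
  else p

def scan_yaml_complexity_py_alt (content : String) : Int × Int × Int × Int :=
  let anchors : Int := (PySem.Str.count content "&" : Int)
  let aliases : Int := (PySem.Str.count content "*" : Int)
  let indents := (PySem.Str.splitlines content).filterMap pyBIndent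
  let max_indent := PySem.List.maxD indents (fun x => x) 0
  let flow := content.toList.foldl pyBFlow (0, 0)
  (max_indent, flow.2, anchors, aliases)

-- ===== PRECONDITION & SPEC =====
def Spec_scan_yaml_complexity_py (content : String) (out : Int × Int × Int × Int) : Prop := out = scan_yaml_complexity_py_alt content
instance (content : String) (out : Int × Int × Int × Int) : Decidable (Spec_scan_yaml_complexity_py content out) := by unfold Spec_scan_yaml_complexity_py; infer_instance

-- ===== CLAIM (what is proved, stated in full; the proofs are below) =====
def Claim_equal_scan_yaml_complexity_py : Prop := ∀ (content : String), Dom_scan_yaml_complexity_py content → Spec_scan_yaml_complexity_py content (scan_yaml_complexity_py content)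

-- ===== LEMMAS AND PROOFS =====

-- A's per-line indent update, named for the proofs
def pvIndentUpd (mi : Int) (line : String) : Int :=
  match pyBIndent line with
  | some d => max mi d
  | none => mi

-- per-char counting bodies, named for the proofs
def pvAmp (a : Int) (c : Char) : Int := if c = '&' then a + 1 else a
def pvStar (a : Int) (c : Char) : Int := if c = '*' then a + 1 else a

-- one step of A's inner loop, component by component
lemma pyAChar_head (mi fd mfd an al : Int) (c : Char) :
    pyAChar (mi, fd, mfd, an, al) c =
      (mi, (pyBFlow (fd, mfd) c).1, (pyBFlow (fd, mfd) c).2, pvAmp an c, pvStar al c) := by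
  by_cases h1 : c = '{' ∨ c = '['
  · have ha : ¬ c = '&' := by rcases h1 with rfl | rfl <;> decide
    have hs : ¬ c = '*' := by rcases h1 with rfl | rfl <;> decide
    simp only [pyAChar, pyBFlow, pvAmp, pvStar, if_pos h1, if_neg ha, if_neg hs]
    have hm : (if fd + 1 > mfd then fd + 1 else mfd) = max mfd (fd + 1) := by
      rw [max_def]; split_ifs <;> omega
    rw [hm]
  · by_cases h2 : c = '}' ∨ c = ']'
    · have ha : ¬ c = '&' := by rcases h2 with rfl | rfl <;> decide
      have hs : ¬ c = '*' := by rcases h2 with rfl | rfl <;> decide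
      by_cases h3 : fd > 0
      · simp only [pyAChar, pyBFlow, pvAmp, pvStar, if_neg h1, if_pos h2, if_pos h3,
          if_pos (show (c = '}' ∨ c = ']') ∧ fd > 0 from ⟨h2, h3⟩), if_neg ha, if_neg hs]
      · simp only [pyAChar, pyBFlow, pvAmp, pvStar, if_neg h1, if_pos h2, if_neg h3,
          if_neg (show ¬ ((c = '}' ∨ c = ']') ∧ fd > 0) from fun h => h3 h.2), if_neg ha, if_neg hs]
    · by_cases h4 : c = '&'
      · have hs : ¬ c = '*' := by subst h4; decide
        simp only [pyAChar, pyBFlow, pvAmp, pvStar, if_neg h1, if_neg h2, if_pos h4, if_neg hs,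
          if_neg (show ¬ ((c = '}' ∨ c = ']') ∧ fd > 0) from fun h => h2 h.1)]
      · by_cases h5 : c = '*'
        · simp only [pyAChar, pyBFlow, pvAmp, pvStar, if_neg h1, if_neg h2, if_neg h4, if_pos h5,
            if_neg (show ¬ ((c = '}' ∨ c = ']') ∧ fd > 0) from fun h => h2 h.1)]
        · simp only [pyAChar, pyBFlow, pvAmp, pvStar, if_neg h1, if_neg h2, if_neg h4, if_neg h5,
            if_neg (show ¬ ((c = '}' ∨ c = ']') ∧ fd > 0) from fun h => h2 h.1)]

-- A's inner char fold splits into B's flow fold plus two independent counters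
lemma pyAChar_fold (cs : List Char) : ∀ (mi fd mfd an al : Int),
    cs.foldl pyAChar (mi, fd, mfd, an, al) =
      (mi, (cs.foldl pyBFlow (fd, mfd)).1, (cs.foldl pyBFlow (fd, mfd)).2,
       cs.foldl pvAmp an, cs.foldl pvStar al) := by
  induction cs with
  | nil => intro mi fd mfd an al; rfl
  | cons c t ih =>
    intro mi fd mfd an al
    simp only [List.foldl_cons, pyAChar_head]
    rw [ih mi (pyBFlow (fd, mfd) c).1 (pyBFlow (fd, mfd) c).2 (pvAmp an c) (pvStar al c)]

-- A's per-line body, decomposed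
lemma pyALine_eq (st : Int × Int × Int × Int × Int) (line : String) :
    pyALine st line =
      (pvIndentUpd st.1 line,
       (line.toList.foldl pyBFlow (st.2.1, st.2.2.1)).1,
       (line.toList.foldl pyBFlow (st.2.1, st.2.2.1)).2,
       line.toList.foldl pvAmp st.2.2.2.1, line.toList.foldl pvStar st.2.2.2.2) := by
  obtain ⟨mi, fd, mfd, an, al⟩ := st
  by_cases hg : line.toList.dropWhile (fun c => c == ' ') ≠ [] ∧
      PySem.Chars.startswith (line.toList.dropWhile (fun c => c == ' ')) ['#'] = false
  · have hB : pyBIndent line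
        = some (PySem.Str.len line - ((line.toList.dropWhile (fun c => c == ' ')).length : Int)) := by
      simp only [pyBIndent]; rw [if_pos hg]
    simp only [pyALine, pvIndentUpd, hB]
    rw [if_pos hg]
    split_ifs with hi
    · rw [pyAChar_fold]
      have : max mi (PySem.Str.len line - ((line.toList.dropWhile (fun c => c == ' ')).length : Int))
          = PySem.Str.len line - ((line.toList.dropWhile (fun c => c == ' ')).length : Int) :=
        max_eq_right (le_of_lt hi)
      rw [this]
    · rw [pyAChar_fold]
      have : max mi (PySem.Str.len line - ((line.toList.dropWhile (fun c => c == ' ')).length : Int))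
          = mi := max_eq_left (by omega)
      rw [this]
  · have hB : pyBIndent line = none := by simp only [pyBIndent]; rw [if_neg hg]
    simp only [pyALine, pvIndentUpd, hB]
    rw [if_neg hg, pyAChar_fold]

-- A's outer fold splits into four independent line-folds
lemma pyALine_outer (lines : List String) : ∀ (mi fd mfd an al : Int),
    lines.foldl pyALine (mi, fd, mfd, an, al) =
      (lines.foldl pvIndentUpd mi,
       (lines.foldl (fun p l => l.toList.foldl pyBFlow p) (fd, mfd)).1,
       (lines.foldl (fun p l => l.toList.foldl pyBFlow p) (fd, mfd)).2,
       lines.foldl (fun a l => l.toList.foldl pvAmp a) an,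
       lines.foldl (fun a l => l.toList.foldl pvStar a) al) := by
  induction lines with
  | nil => intro mi fd mfd an al; rfl
  | cons line t ih =>
    intro mi fd mfd an al
    simp only [List.foldl_cons, pyALine_eq]
    exact ih _ _ _ _ _

-- the indent fold is a running max over the surviving per-line indents
lemma indent_fold (lines : List String) : ∀ (mi : Int),
    lines.foldl pvIndentUpd mi = (lines.filterMap pyBIndent).foldl max mi := by
  induction lines with
  | nil => intro mi; rfl
  | cons line t ih =>
    intro mi
    simp only [List.foldl_cons, List.filterMap_cons, pvIndentUpd]
    cases h : pyBIndent line with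
    | none => exact ih mi
    | some d => simp only [List.foldl_cons]; exact ih (max mi d)

-- surviving indents are nonnegative (lstrip never lengthens the line)
lemma pyBIndent_nonneg (line : String) (d : Int) (h : pyBIndent line = some d) : 0 ≤ d := by
  simp only [pyBIndent] at h
  split_ifs at h
  have hle := List.length_dropWhile_le (fun c => c == ' ') line.toList
  simp only [Option.some.injEq] at h
  simp only [PySem.Str.len] at h
  omega

-- max(xs, default=0) over nonnegative ints is the running max from 0
lemma maxD_eq_foldl (xs : List Int) (h : ∀ x ∈ xs, 0 ≤ x) :
    PySem.List.maxD xs (fun x => x) 0 = xs.foldl max 0 := by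
  cases xs with
  | nil => simp [PySem.List.maxD_nil]
  | cons x t =>
    rw [PySem.List.maxD_id_cons, List.foldl_cons]
    rw [max_eq_right (h x (by simp))]

-- reduction steps of splitlines.go, named for the proofs
lemma go_step_nil (isB : Char → Bool) (cur : List Char) (acc : List (List Char)) :
    PySem.Chars.splitlines.go isB [] cur acc
      = if cur.isEmpty then acc.reverse else (cur.reverse :: acc).reverse := rfl

lemma go_step_crlf (isB : Char → Bool) (rest cur : List Char) (acc : List (List Char)) :
    PySem.Chars.splitlines.go isB ('\x0d' :: '\n' :: rest) cur acc
      = PySem.Chars.splitlines.go isB rest [] (cur.reverse :: acc) := rfl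

lemma go_step_break (isB : Char → Bool) (c : Char) (rest cur : List Char) (acc : List (List Char))
    (hne : ∀ (rest_1 : List Char), c = '\x0d' → rest = '\n' :: rest_1 → False)
    (hb : isB c = true) :
    PySem.Chars.splitlines.go isB (c :: rest) cur acc
      = PySem.Chars.splitlines.go isB rest [] (cur.reverse :: acc) := by
  rw [PySem.Chars.splitlines.go.eq_def]
  split
  · next heq => exact absurd heq (by simp)
  · next r' heq =>
    exfalso
    injection heq with h1 h2
    exact hne r' h1 h2
  · next c' r' hne' heq =>
    injection heq with h1 h2
    subst h2; subst h1
    rw [if_pos hb]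

lemma go_step_keep (isB : Char → Bool) (c : Char) (rest cur : List Char) (acc : List (List Char))
    (hne : ∀ (rest_1 : List Char), c = '\x0d' → rest = '\n' :: rest_1 → False)
    (hb : ¬ isB c = true) :
    PySem.Chars.splitlines.go isB (c :: rest) cur acc
      = PySem.Chars.splitlines.go isB rest (c :: cur) acc := by
  rw [PySem.Chars.splitlines.go.eq_def]
  split
  · next heq => exact absurd heq (by simp)
  · next r' heq =>
    exfalso
    injection heq with h1 h2
    exact hne r' h1 h2
  · next c' r' hne' heq =>
    injection heq with h1 h2
    subst h2; subst h1
    rw [if_neg hb]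

-- folding a line-break-invariant step over the lines of splitlines.go equals folding it over the raw chars
lemma go_fold {σ : Type} (g : σ → Char → σ) (isB : Char → Bool)
    (hInv : ∀ (s : σ) (c : Char), c.toNat = 10 ∨ c.toNat = 13 → g s c = s)
    (hB : ∀ c, pvDomChar c = true → isB c = true → c.toNat = 10 ∨ c.toNat = 13)
    (cs cur : List Char) (acc : List (List Char)) :
    ∀ (init : σ), cs.all pvDomChar = true →
    (PySem.Chars.splitlines.go isB cs cur acc).foldl (fun s l => l.foldl g s) init
      = cs.foldl g ((acc.reverse ++ [cur.reverse]).foldl (fun s l => l.foldl g s) init) := by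
  induction cs, cur, acc using PySem.Chars.splitlines.go.induct (isB := isB) with
  | case1 cur acc hcur =>
    intro init _
    rw [List.isEmpty_iff] at hcur
    subst hcur
    rw [go_step_nil]
    simp [List.foldl_append]
  | case2 cur acc hcur =>
    intro init _
    rw [go_step_nil, if_neg (by simpa using hcur)]
    simp [List.foldl_append]
  | case3 rest cur acc ih =>
    intro init hdom
    simp only [List.all_cons, Bool.and_eq_true] at hdom
    rw [go_step_crlf, ih init hdom.2.2]
    simp only [List.reverse_cons, List.reverse_nil, List.foldl_append, List.foldl_cons,
      List.foldl_nil]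
    rw [hInv _ '\x0d' (by decide), hInv _ '\n' (by decide)]
  | case4 c rest cur acc hne hb ih =>
    intro init hdom
    simp only [List.all_cons, Bool.and_eq_true] at hdom
    have hc := hB c hdom.1 hb
    rw [go_step_break isB c rest cur acc hne hb, ih init hdom.2]
    simp only [List.reverse_cons, List.reverse_nil, List.foldl_append, List.foldl_cons,
      List.foldl_nil]
    rw [hInv _ c hc]
  | case5 c rest cur acc hne hb ih =>
    intro init hdom
    simp only [List.all_cons, Bool.and_eq_true] at hdom
    rw [go_step_keep isB c rest cur acc hne hb, ih init hdom.2]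
    simp only [List.reverse_cons, List.foldl_append, List.foldl_cons, List.foldl_nil]

-- the same, stated on Chars.splitlines
lemma splitlines_fold {σ : Type} (g : σ → Char → σ)
    (hInv : ∀ (s : σ) (c : Char), c.toNat = 10 ∨ c.toNat = 13 → g s c = s)
    (cs : List Char) (hdom : cs.all pvDomChar = true) (init : σ) :
    (PySem.Chars.splitlines cs).foldl (fun s l => l.foldl g s) init = cs.foldl g init := by
  unfold PySem.Chars.splitlines
  refine Eq.trans (go_fold g _ hInv ?_ cs [] [] init hdom) ?_
  · intro c hd hb
    simp only [pvDomChar, Bool.or_eq_true, Bool.and_eq_true, decide_eq_true_eq,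
      Nat.beq_eq_true_eq] at hd hb
    omega
  · simp

-- lifted to String lines
lemma lines_fold {σ : Type} (g : σ → Char → σ)
    (hInv : ∀ (s : σ) (c : Char), c.toNat = 10 ∨ c.toNat = 13 → g s c = s)
    (content : String) (hdom : Dom_scan_yaml_complexity_py content) (init : σ) :
    (PySem.Str.splitlines content).foldl (fun a l => l.toList.foldl g a) init
      = content.toList.foldl g init := by
  have h1 : (PySem.Str.splitlines content).foldl (fun a l => l.toList.foldl g a) init
      = ((PySem.Str.splitlines content).map String.toList).foldl (fun a l => l.foldl g a) init := by
    rw [List.foldl_map]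
  rw [h1, PySem.Str.splitlines_map_toList]
  exact splitlines_fold g hInv content.toList hdom init

-- s.count(single char) counts matching positions
lemma count_go_single (c : Char) : ∀ (fuel : Nat) (l : List Char) (acc : Nat), l.length ≤ fuel →
    PySem.Chars.count.go [c] fuel l acc = acc + l.countP (fun x => x == c) := by
  intro fuel
  induction fuel with
  | zero =>
    intro l acc h
    rw [Nat.le_zero, List.length_eq_zero_iff] at h
    subst h
    simp [PySem.Chars.count.go]
  | succ n ih =>
    intro l acc h
    cases l with
    | nil => simp [PySem.Chars.count.go]
    | cons x t =>
      rw [PySem.Chars.count.go]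
      by_cases hx : c = x
      · subst hx
        simp only [List.isPrefixOf, beq_self_eq_true, Bool.true_and, if_true, List.length_singleton, List.drop_succ_cons, List.drop_zero]
        rw [ih t (acc + 1) (by simpa using h)]
        simp only [List.countP_cons, beq_self_eq_true, if_true]
        omega
      · have hbx : (c == x) = false := by simp [hx]
        simp only [List.isPrefixOf, hbx, Bool.false_and, Bool.false_eq_true, if_false]
        rw [ih t acc (by simpa using h)]
        have hxb : (x == c) = false := by
          simp only [beq_eq_false_iff_ne, ne_eq]
          exact fun h' => hx h'.symm
        simp [hxb]

lemma count_single (cs : List Char) (c : Char) :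
    PySem.Chars.count cs [c] = cs.countP (fun x => x == c) := by
  simp only [PySem.Chars.count, List.isEmpty_cons, Bool.false_eq_true, if_false]
  simpa using count_go_single c cs.length cs 0 (le_refl _)

-- the two counter folds over raw chars compute the char counts
lemma pvAmp_fold (cs : List Char) :
    cs.foldl pvAmp 0 = ((cs.countP (fun x => x == '&') : Nat) : Int) := by
  have h := PySem.List.foldl_ite_add_one (fun c : Char => c = '&') cs 0
  have he : cs.foldl pvAmp 0 = cs.foldl (fun acc x => if x = '&' then acc + 1 else acc) 0 := rfl
  rw [he, h, zero_add]
  have hc : cs.countP (fun c : Char => decide (c = '&')) = cs.countP (fun x => x == '&') :=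
    List.countP_congr (fun x _ => by by_cases hx : x = '&' <;> simp [hx])
  rw [hc]

lemma pvStar_fold (cs : List Char) :
    cs.foldl pvStar 0 = ((cs.countP (fun x => x == '*') : Nat) : Int) := by
  have h := PySem.List.foldl_ite_add_one (fun c : Char => c = '*') cs 0
  have he : cs.foldl pvStar 0 = cs.foldl (fun acc x => if x = '*' then acc + 1 else acc) 0 := rfl
  rw [he, h, zero_add]
  have hc : cs.countP (fun c : Char => decide (c = '*')) = cs.countP (fun x => x == '*') :=
    List.countP_congr (fun x _ => by by_cases hx : x = '*' <;> simp [hx])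
  rw [hc]

-- break characters are invisible to each of B's char-level passes
lemma pyBFlow_inv : ∀ (s : Int × Int) (c : Char), c.toNat = 10 ∨ c.toNat = 13 → pyBFlow s c = s := by
  intro s c hc
  have h1 : ¬ (c = '{' ∨ c = '[') := by rintro (rfl | rfl) <;> simp at hc
  have h2 : ¬ ((c = '}' ∨ c = ']') ∧ s.1 > 0) := by rintro ⟨rfl | rfl, -⟩ <;> simp at hc
  simp only [pyBFlow, if_neg h1, if_neg h2]

lemma pvAmp_inv : ∀ (s : Int) (c : Char), c.toNat = 10 ∨ c.toNat = 13 → pvAmp s c = s := by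
  intro s c hc
  have h1 : ¬ c = '&' := by rintro rfl; simp at hc
  simp only [pvAmp, if_neg h1]

lemma pvStar_inv : ∀ (s : Int) (c : Char), c.toNat = 10 ∨ c.toNat = 13 → pvStar s c = s := by
  intro s c hc
  have h1 : ¬ c = '*' := by rintro rfl; simp at hc
  simp only [pvStar, if_neg h1]

-- ===== VERDICT (by name: the statement is the Claim_ definition above) =====
theorem scan_yaml_complexity_py_spec : Claim_equal_scan_yaml_complexity_py := by
  intro content hdom
  unfold Spec_scan_yaml_complexity_py
  simp only [scan_yaml_complexity_py, scan_yaml_complexity_py_alt]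
  rw [pyALine_outer]
  simp only [Prod.mk.injEq]
  refine ⟨?_, ?_, ?_, ?_⟩
  · rw [indent_fold, maxD_eq_foldl]
    intro x hx
    obtain ⟨line, _, he⟩ := List.mem_filterMap.mp hx
    exact pyBIndent_nonneg line x he
  · rw [lines_fold pyBFlow pyBFlow_inv content hdom (0, 0)]
  · rw [lines_fold pvAmp pvAmp_inv content hdom 0, pvAmp_fold, PySem.Str.count_eq]
    rw [show ("&" : String).toList = ['&'] from by decide, count_single]
  · rw [lines_fold pvStar pvStar_inv content hdom 0, pvStar_fold, PySem.Str.count_eq]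
    rw [show ("*" : String).toList = ['*'] from by decide, count_single]
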